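-- pv_equiv track=rewrite | github.com/mo-jsx/vrpex-backend | tools/gen.py | check_and_repair_route
-- ===== SOURCE A (Python) =====
-- def check_and_repair_route(route):
--     repeated = set()
--     repaired_route = []
--
--     for node in route:
--         if node not in repeated:
--             repaired_route.append(node)
--             repeated.add(node)
--         else:
--             for i in range(1, len(route) + 1):
--                 if i not in repeated:
--                     repaired_route.append(i)
--                     repeated.add(i)
--                     break
--
--     return repaired_route
-- ===== SOURCE B (Python) =====
-- def check_and_repair_route(route):
--     # One pass with a monotonic pointer to the smallest candidate replacement:
--     # the set of used values only grows, so the smallest unused integer never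
--     # decreases and each duplicate is repaired without rescanning from 1.
--     n = len(route)
--     seen = set()
--     out = []
--     cur = 1
--     for node in route:
--         if node not in seen:
--             out.append(node)
--             seen.add(node)
--         else:
--             while cur <= n and cur in seen:
--                 cur += 1
--             if cur <= n:
--                 out.append(cur)
--                 seen.add(cur)
--                 cur += 1
--     return out
-- ===== Notes on version B (the rewrite author's own statement) =====
-- stated objective: faster
-- what changed: Replaces A's inner rescan from 1 over range(1, n+1) at every duplicate with a single monotonic pointer to the smallest unused replacement value, advanced at most n times over the whole run.
import Mathlib
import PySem

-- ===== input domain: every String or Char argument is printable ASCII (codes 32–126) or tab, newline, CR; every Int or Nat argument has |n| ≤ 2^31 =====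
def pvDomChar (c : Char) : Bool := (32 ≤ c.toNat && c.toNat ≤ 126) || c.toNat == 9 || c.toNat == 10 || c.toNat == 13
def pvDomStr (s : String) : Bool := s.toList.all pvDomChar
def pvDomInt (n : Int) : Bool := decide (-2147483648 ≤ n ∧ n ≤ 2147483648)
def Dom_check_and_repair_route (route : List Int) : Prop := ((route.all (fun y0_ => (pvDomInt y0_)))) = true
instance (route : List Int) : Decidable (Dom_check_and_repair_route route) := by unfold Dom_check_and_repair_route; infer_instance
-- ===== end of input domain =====

-- B is faster: A rescans range(1, n+1) from the start at every duplicate; B keeps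
-- a monotonic pointer to the smallest unused replacement value (the used set only
-- grows, so the smallest unused value never decreases).

-- ===== PORT A =====
-- inner loop of A: first i in the given range list not in the set (none = loop ends without break)
def pvFindUnused (S : PySem.Set Int) : List Int → Option Int
  | [] => none
  | i :: rest => if S.contains i then pvFindUnused S rest else some i

def pvGoA (n : Int) : List Int → PySem.Set Int → List Int → List Int
  | [], _, acc => acc
  | node :: rest, S, acc =>
    if ¬ S.contains node then
      pvGoA n rest (PySem.Set.add S node) (acc ++ [node])
    else
      match pvFindUnused S (PySem.List.pyRange 1 (n + 1) 1) with
      | some i => pvGoA n rest (PySem.Set.add S i) (acc ++ [i])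
      | none => pvGoA n rest S acc

def check_and_repair_route (route : List Int) : List Int :=
  pvGoA (route.length : Int) route PySem.Set.empty []

-- ===== PORT B =====
-- B's while loop: advance cur while cur <= n and cur in seen
def pvAdvance (S : PySem.Set Int) (n : Int) (cur : Int) : Int :=
  if cur ≤ n ∧ S.contains cur then pvAdvance S n (cur + 1) else cur
termination_by (n + 1 - cur).toNat
decreasing_by omega

def pvGoB (n : Int) : List Int → PySem.Set Int → List Int → Int → List Int
  | [], _, acc, _ => acc
  | node :: rest, S, acc, cur =>
    if ¬ S.contains node then
      pvGoB n rest (PySem.Set.add S node) (acc ++ [node]) cur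
    else
      let c := pvAdvance S n cur
      if c ≤ n then pvGoB n rest (PySem.Set.add S c) (acc ++ [c]) (c + 1)
      else pvGoB n rest S acc c

def check_and_repair_route_alt (route : List Int) : List Int :=
  pvGoB (route.length : Int) route PySem.Set.empty [] 1

-- ===== PRECONDITION & SPEC =====
def Spec_check_and_repair_route (route : List Int) (out : List Int) : Prop := out = check_and_repair_route_alt route
instance (route : List Int) (out : List Int) : Decidable (Spec_check_and_repair_route route out) := by unfold Spec_check_and_repair_route; infer_instance

-- ===== CLAIM (what is proved, stated in full; the proofs are below) =====
def Claim_equal_check_and_repair_route : Prop := ∀ (route : List Int), Dom_check_and_repair_route route → Spec_check_and_repair_route route (check_and_repair_route route)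

-- ===== LEMMAS AND PROOFS =====

theorem pvAdvance_le (S : PySem.Set Int) (n cur : Int) : cur ≤ pvAdvance S n cur := by
  fun_induction pvAdvance S n cur with
  | case1 cur h ih => omega
  | case2 cur h => exact le_rfl

theorem pvAdvance_le_succ (S : PySem.Set Int) (n cur : Int) :
    cur ≤ n + 1 → pvAdvance S n cur ≤ n + 1 := by
  fun_induction pvAdvance S n cur with
  | case1 cur h ih => intro _; exact ih (by omega)
  | case2 cur h => intro hc; exact hc

theorem pvAdvance_mem (S : PySem.Set Int) (n cur : Int) :
    ∀ j, cur ≤ j → j < pvAdvance S n cur → S.contains j = true := by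
  fun_induction pvAdvance S n cur with
  | case1 cur h ih =>
    intro j hj1 hj2
    rcases eq_or_lt_of_le hj1 with rfl | hlt
    · exact h.2
    · exact ih j (by omega) hj2
  | case2 cur h =>
    intro j hj1 hj2
    omega

-- A's inner scan from a computes exactly B's advance from a (some iff it lands ≤ n)
theorem pvFind_eq_advance (S : PySem.Set Int) (n : Int) (a : Int) :
    pvFindUnused S (PySem.List.pyRange a (n + 1) 1) =
      (if pvAdvance S n a ≤ n then some (pvAdvance S n a) else none) := by
  fun_induction pvAdvance S n a with
  | case1 a h ih =>
    rw [PySem.List.pyRange_one_cons (by omega : a < n + 1)]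
    rw [pvFindUnused, if_pos h.2]
    exact ih
  | case2 a h =>
    by_cases ha : a ≤ n
    · have hc : ¬ S.contains a = true := fun hc => h ⟨ha, hc⟩
      rw [PySem.List.pyRange_one_cons (by omega : a < n + 1), pvFindUnused,
        if_neg hc, if_pos ha]
    · rw [PySem.List.pyRange_one_eq_nil (by omega : n + 1 ≤ a), pvFindUnused, if_neg ha]

-- the pointer is monotone-safe: advancing from 1 equals advancing from cur
-- when everything in [1, cur) is already used
theorem pvAdvance_skip (S : PySem.Set Int) (n : Int) (a cur : Int)
    (hac : a ≤ cur) (hcn : cur ≤ n + 1)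
    (hmem : ∀ j, a ≤ j → j < cur → S.contains j = true) :
    pvAdvance S n a = pvAdvance S n cur := by
  rcases eq_or_lt_of_le hac with rfl | hlt
  · rfl
  · have h : a ≤ n ∧ S.contains a = true := ⟨by omega, hmem a le_rfl hlt⟩
    rw [pvAdvance, if_pos h]
    exact pvAdvance_skip S n (a + 1) cur (by omega) hcn (fun j h1 h2 => hmem j (by omega) h2)
termination_by (cur - a).toNat
decreasing_by omega

theorem contains_add_of_contains (S : PySem.Set Int) (x j : Int)
    (h : S.contains j = true) : (PySem.Set.add S x).contains j = true := by
  rw [PySem.Set.contains_iff] at h ⊢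
  rw [PySem.Set.mem_add]
  exact Or.inl h

theorem pvGoA_eq_goB (n : Int) (l : List Int) :
    ∀ (S : PySem.Set Int) (acc : List Int) (cur : Int),
      1 ≤ cur → cur ≤ n + 1 →
      (∀ j, 1 ≤ j → j < cur → S.contains j = true) →
      pvGoA n l S acc = pvGoB n l S acc cur := by
  induction l with
  | nil => intro S acc cur _ _ _; rfl
  | cons node rest ih =>
    intro S acc cur h1 h2 hmem
    rw [pvGoA, pvGoB]
    by_cases hn : S.contains node = true
    · rw [if_neg (not_not_intro hn), if_neg (not_not_intro hn)]
      have hskip : pvAdvance S n 1 = pvAdvance S n cur :=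
        pvAdvance_skip S n 1 cur h1 h2 (fun j hj1 hj2 => hmem j hj1 hj2)
      rw [pvFind_eq_advance S n 1, hskip]
      set c := pvAdvance S n cur with hc
      by_cases hcn : c ≤ n
      · rw [if_pos hcn, if_pos hcn]
        refine ih _ _ (c + 1) (by have := pvAdvance_le S n cur; omega) (by omega) ?_
        intro j hj1 hj2
        by_cases hjc : j = c
        · subst hjc
          rw [PySem.Set.contains_iff, PySem.Set.mem_add]; exact Or.inr rfl
        · apply contains_add_of_contains
          by_cases hjcur : j < cur
          · exact hmem j hj1 hjcur
          · exact pvAdvance_mem S n cur j (by omega) (by omega)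
      · rw [if_neg hcn, if_neg hcn]
        refine ih _ _ c (by have := pvAdvance_le S n cur; omega)
          (pvAdvance_le_succ S n cur h2) ?_
        intro j hj1 hj2
        by_cases hjcur : j < cur
        · exact hmem j hj1 hjcur
        · exact pvAdvance_mem S n cur j (by omega) (by omega)
    · rw [if_pos hn, if_pos hn]
      exact ih _ _ cur h1 h2 (fun j hj1 hj2 => contains_add_of_contains S node j (hmem j hj1 hj2))

-- ===== VERDICT (by name: the statement is the Claim_ definition above) =====
theorem check_and_repair_route_spec : Claim_equal_check_and_repair_route := by
  intro route _
  unfold Spec_check_and_repair_route check_and_repair_route check_and_repair_route_alt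
  exact pvGoA_eq_goB (route.length : Int) route PySem.Set.empty [] 1
    le_rfl (by have : (0:Int) ≤ (route.length : Int) := Int.natCast_nonneg _; omega)
    (fun j hj1 hj2 => absurd (by omega : (1:Int) ≤ 1 ∧ False → True) (by omega))
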